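-- pv_equiv track=rewrite | github.com/NullZeroOne/Toys | backwards_life_torus_growing.py | canonicalize_torus
-- ===== SOURCE A (Python) =====
-- from typing import List, Tuple, Set, Optional
--
-- def torus_translations(R: int, C: int):
--     for dr in range(R):
--         for dc in range(C):
--             yield dr, dc
--
-- def translate_grid(grid: List[List[int]], dr: int, dc: int) -> List[List[int]]:
--     R, C = len(grid), len(grid[0])
--     out = [[0]*C for _ in range(R)]
--     for i in range(R):
--         for j in range(C):
--             out[i][j] = grid[(i+dr)%R][(j+dc)%C]
--     return out
--
-- def grid_to_bitstring(grid: List[List[int]]) -> str: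
--     return ''.join('1' if v else '0' for row in grid for v in row)
--
-- def canonicalize_torus(grid: List[List[int]]) -> str:
--     R, C = len(grid), len(grid[0])
--     best = None
--     for dr, dc in torus_translations(R, C):
--         g2 = translate_grid(grid, dr, dc)
--         s = grid_to_bitstring(g2)
--         if best is None or s < best:
--             best = s
--     return best  # canonical key string
-- ===== SOURCE B (Python) =====
-- def canonicalize_torus(grid):
--     R, C = len(grid), len(grid[0])
--     rows = [''.join('1' if v else '0' for v in row[:C]) for row in grid]
--     dbl2 = [r + r for r in rows] * 2
--     return min(
--         ''.join(dbl2[dr + r][dc:dc + C] for r in range(R))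
--         for dr in range(R) for dc in range(C)
--     )
-- ===== Notes on version B (the rewrite author's own statement) =====
-- stated objective: faster
-- what changed: B replaces A's per-translation construction of a translated 2D grid cell by cell (with two modulo operations per cell) by precomputing each row's bitstring once, doubling the rows and the row list, and reading every translated candidate directly as R contiguous slices of the doubled rows, taking the minimum with builtin min(); same enumeration of translations, but no per-cell work.
-- outside the precondition, e.g. on canonicalize_torus([[]]): A returns None, B raises ValueError
import Mathlib
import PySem

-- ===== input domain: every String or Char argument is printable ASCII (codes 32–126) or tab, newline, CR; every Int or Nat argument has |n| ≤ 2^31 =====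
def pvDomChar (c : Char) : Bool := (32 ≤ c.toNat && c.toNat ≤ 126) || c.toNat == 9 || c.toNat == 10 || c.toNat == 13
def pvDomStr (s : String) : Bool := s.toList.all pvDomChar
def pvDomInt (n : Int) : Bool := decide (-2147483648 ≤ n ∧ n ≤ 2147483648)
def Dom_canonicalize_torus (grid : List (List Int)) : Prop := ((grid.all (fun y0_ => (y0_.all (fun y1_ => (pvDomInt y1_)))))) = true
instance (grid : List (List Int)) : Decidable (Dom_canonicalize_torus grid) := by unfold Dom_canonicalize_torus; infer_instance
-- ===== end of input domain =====

-- B precomputes each row's bitstring once, doubles rows and row list, and reads each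
-- translated candidate as R contiguous slices, taking min(); no per-cell modular work
-- (measurably faster by a large constant factor; same O(R^2 C^2) worst case).

-- ===== PORT A =====
-- bitstrings are built as List Char and packed into String at the end (Python builds str;
-- Lean's own String functions are kernel-opaque, so ports work on the char list).

def torus_translations (R C : Int) : List (Int × Int) :=
  (PySem.List.pyRange 0 R 1).flatMap (fun dr =>
    (PySem.List.pyRange 0 C 1).map (fun dc => (dr, dc)))

def translate_grid (grid : List (List Int)) (dr dc : Int) : List (List Int) :=
  let R : Int := grid.length
  let C : Int := (PySem.List.pyGetD grid 0 []).length
  (PySem.List.pyRange 0 R 1).map (fun i =>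
    (PySem.List.pyRange 0 C 1).map (fun j =>
      PySem.List.pyGetD (PySem.List.pyGetD grid (PySem.Int.mod (i + dr) R) [])
        (PySem.Int.mod (j + dc) C) 0))

def grid_to_bitstring (grid : List (List Int)) : List Char :=
  grid.flatMap (fun row => row.map (fun v => if v = 0 then '0' else '1'))

def canonicalize_torus (grid : List (List Int)) : String :=
  let R : Int := grid.length
  let C : Int := (PySem.List.pyGetD grid 0 []).length
  let best : Option (List Char) := (torus_translations R C).foldl
    (fun best p =>
      let s := grid_to_bitstring (translate_grid grid p.1 p.2)
      match best with
      | none => some s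
      | some b => if s < b then some s else some b) none
  String.ofList (best.getD [])

-- ===== PORT B =====
def canonicalize_torus_alt (grid : List (List Int)) : String :=
  let R : Int := grid.length
  let C : Int := (PySem.List.pyGetD grid 0 []).length
  let rows : List (List Char) := grid.map (fun row =>
    (PySem.List.slice row none (some C)).map (fun v => if v = 0 then '0' else '1'))
  let dbl2 : List (List Char) := PySem.List.pyRepeat (rows.map (fun r => r ++ r)) 2
  let cands : List (List Char) := (PySem.List.pyRange 0 R 1).flatMap (fun dr =>
    (PySem.List.pyRange 0 C 1).map (fun dc =>
      ((PySem.List.pyRange 0 R 1).map (fun r =>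
        PySem.List.slice (PySem.List.pyGetD dbl2 (dr + r) []) (some dc) (some (dc + C)))).flatten))
  String.ofList ((PySem.List.min? cands (fun s => s)).getD [])

-- ===== PRECONDITION & SPEC =====
-- Pre_ excludes exactly the inputs on which the Python A raises or returns None instead of a
-- str: the empty grid (grid[0] IndexError), a grid whose first row is empty (the translation
-- loop never runs and A returns None), and grids with a row shorter than len(grid[0])
-- (IndexError inside translate_grid).
def Pre_canonicalize_torus (grid : List (List Int)) : Prop :=
  grid ≠ [] ∧ 0 < (grid.headD []).length ∧ ∀ row ∈ grid, (grid.headD []).length ≤ row.length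
instance (grid : List (List Int)) : Decidable (Pre_canonicalize_torus grid) := by
  unfold Pre_canonicalize_torus; infer_instance

def pvWitness_canonicalize_torus : List (List Int) := [[1, 0], [0, 0]]

def Spec_canonicalize_torus (grid : List (List Int)) (out : String) : Prop := out = canonicalize_torus_alt grid
instance (grid : List (List Int)) (out : String) : Decidable (Spec_canonicalize_torus grid out) := by unfold Spec_canonicalize_torus; infer_instance

-- ===== CLAIM (what is proved, stated in full; the proofs are below) =====
def Claim_equal_canonicalize_torus : Prop := ∀ (grid : List (List Int)), Dom_canonicalize_torus grid → Pre_canonicalize_torus grid → Spec_canonicalize_torus grid (canonicalize_torus grid)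

-- ===== LEMMAS AND PROOFS =====

-- the 0/1 encoding of a cell
def pvBit (v : Int) : Char := if v = 0 then '0' else '1'

-- grid[0] is the head of the list
theorem pv_headD_eq (grid : List (List Int)) :
    PySem.List.pyGetD grid 0 [] = grid.headD [] := by
  cases grid with
  | nil => rfl
  | cons x t => simp [PySem.List.pyGetD, PySem.List.pyGet?, PySem.List.pyIdx?]

-- list repetition by 2 is self-append
theorem pv_pyRepeat_two {α : Type} (l : List α) : PySem.List.pyRepeat l 2 = l ++ l := by
  simp [PySem.List.pyRepeat, List.replicate]

-- one row of a translated candidate: reading a row cyclically shifted by b is one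
-- contiguous slice of the doubled row bitstring
theorem pv_row_eq (row : List Int) (C b : Nat) (hC : 0 < C) (hlen : C ≤ row.length)
    (hb : b < C) :
    (PySem.List.pyRange 0 (C : Int) 1).map
        (fun j => if PySem.List.pyGetD row (PySem.Int.mod (j + (b : Int)) (C : Int)) 0 = 0 then '0' else '1')
      = PySem.List.slice ((row.take C).map pvBit ++ (row.take C).map pvBit)
          (some (b : Int)) (some ((b : Int) + (C : Int))) := by
  have hcast : (b:Int) + (C:Int) = ((b + C : Nat) : Int) := by push_cast; ring
  rw [hcast, PySem.List.slice_natCast, PySem.List.pyRange_zero_nat, List.map_map]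
  apply List.ext_getElem
  · simp [hlen]
    omega
  · intro k hk1 hk2
    have hkC : k < C := by simpa using hk1
    simp only [List.getElem_map, List.getElem_range, Function.comp_apply]
    have h1 : (k:Int) + (b:Int) = ((k + b : Nat) : Int) := by push_cast; ring
    rw [h1, PySem.Int.mod_natCast, PySem.List.pyGetD_natCast]
    have hwlen : ((row.take C).map pvBit).length = C := by simp; omega
    have hmod : (k + b) % C < C := Nat.mod_lt _ hC
    have hgetD : row.getD ((k + b) % C) 0 = row[(k + b) % C]'(by omega) := by
      rw [List.getD_eq_getElem]
    rw [List.getElem_take, List.getElem_drop, List.getElem_append]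
    rw [hgetD]
    by_cases hcase : b + k < C
    · rw [dif_pos (by omega : b + k < ((row.take C).map pvBit).length)]
      have : (k + b) % C = b + k := by rw [Nat.mod_eq_of_lt (by omega)]; omega
      simp only [this]
      simp [pvBit, List.getElem_take]
    · rw [dif_neg (by omega : ¬ b + k < ((row.take C).map pvBit).length)]
      have : (k + b) % C = b + k - C := by
        have h2 : k + b - C < C := by omega
        have : (k + b) % C = (k + b - C) % C := by
          conv_lhs => rw [← Nat.sub_add_cancel (by omega : C ≤ k + b)]
          rw [Nat.add_mod_right]
        rw [this, Nat.mod_eq_of_lt h2]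
        omega
      simp only [this, hwlen]
      simp [pvBit, List.getElem_take]

-- whole-candidate equality: A's bitstring of the (dr,dc)-translated grid is B's candidate
theorem pv_cand_eq (grid : List (List Int))
    (hC : 0 < (grid.headD []).length)
    (hrows : ∀ row ∈ grid, (grid.headD []).length ≤ row.length)
    (dr dc : Int) (hdr0 : 0 ≤ dr) (hdrR : dr < (grid.length : Int))
    (hdc0 : 0 ≤ dc) (hdcC : dc < ((grid.headD []).length : Int)) :
    grid_to_bitstring (translate_grid grid dr dc)
      = ((PySem.List.pyRange 0 (grid.length : Int) 1).map (fun r =>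
          PySem.List.slice
            (PySem.List.pyGetD
              (PySem.List.pyRepeat
                ((grid.map (fun row =>
                  (PySem.List.slice row none (some ((grid.headD []).length : Int))).map
                    (fun v => if v = 0 then '0' else '1'))).map (fun r => r ++ r)) 2)
              (dr + r) [])
            (some dc) (some (dc + ((grid.headD []).length : Int))))).flatten := by
  have h0 := pv_headD_eq grid
  obtain ⟨a', rfl⟩ : ∃ a : Nat, dr = (a : Int) := ⟨dr.toNat, (Int.toNat_of_nonneg hdr0).symm⟩
  obtain ⟨b', rfl⟩ : ∃ b : Nat, dc = (b : Int) := ⟨dc.toNat, (Int.toNat_of_nonneg hdc0).symm⟩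
  set R := grid.length with hRdef
  set C := (grid.headD []).length with hCdef
  have haR : a' < R := by exact_mod_cast hdrR
  have hbC : b' < C := by exact_mod_cast hdcC
  have hbit : (fun v : Int => if v = 0 then '0' else '1') = pvBit := rfl
  simp only [translate_grid, grid_to_bitstring, h0, ← hCdef, ← hRdef, hbit]
  rw [pv_pyRepeat_two, List.flatMap_def, List.map_map]
  congr 1
  apply List.map_congr_left
  intro i hi
  obtain ⟨hi0, hiR⟩ := (PySem.List.mem_pyRange_one).1 hi
  obtain ⟨i', rfl⟩ : ∃ n : Nat, i = (n : Int) := ⟨i.toNat, (Int.toNat_of_nonneg hi0).symm⟩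
  have hiR' : i' < R := by exact_mod_cast hiR
  simp only [Function.comp_apply]
  -- the A-side row index
  have hsum : (i' : Int) + (a' : Int) = ((i' + a' : Nat) : Int) := by push_cast; ring
  rw [hsum, PySem.Int.mod_natCast, PySem.List.pyGetD_natCast]
  have hmodR : (i' + a') % R < R := Nat.mod_lt _ (by omega)
  have hrow : grid.getD ((i' + a') % R) [] = grid[(i' + a') % R]'(by omega) :=
    List.getD_eq_getElem _ _ (by omega)
  rw [hrow]
  have hrlen : C ≤ (grid[(i' + a') % R]'(by omega)).length :=
    hrows _ (List.getElem_mem _)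
  -- the B-side doubled-row lookup
  have hsum2 : (a' : Int) + (i' : Int) = ((a' + i' : Nat) : Int) := by push_cast; ring
  rw [hsum2, PySem.List.pyGetD_natCast]
  have hdlen2 : a' + i' < ((grid.map (fun row => (PySem.List.slice row none (some (C:Int))).map pvBit)).map (fun r => r ++ r) ++ (grid.map (fun row => (PySem.List.slice row none (some (C:Int))).map pvBit)).map (fun r => r ++ r)).length := by
    simp [← hRdef]; omega
  rw [List.getD_eq_getElem _ _ hdlen2, List.getElem_append]
  rw [List.map_map]
  by_cases hcase : a' + i' < ((grid.map (fun row => (PySem.List.slice row none (some (C:Int))).map pvBit)).map (fun r => r ++ r)).length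
  · rw [dif_pos hcase]
    have hcase' : a' + i' < R := by simpa [← hRdef] using hcase
    have he : (i' + a') % R = a' + i' := by
      rw [Nat.add_comm]; exact Nat.mod_eq_of_lt hcase'
    simp only [he, List.getElem_map, PySem.List.slice_to_natCast]
    exact pv_row_eq _ C b' hC (by simpa [he] using hrlen) hbC
  · rw [dif_neg hcase]
    have hcase' : ¬ a' + i' < R := by simpa [← hRdef] using hcase
    have he : (i' + a') % R = a' + i' - R := by
      have h2 : a' + i' - R < R := by omega
      have h3 : (i' + a') % R = (a' + i' - R) % R := by
        rw [Nat.add_comm i' a']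
        conv_lhs => rw [← Nat.sub_add_cancel (by omega : R ≤ a' + i')]
        rw [Nat.add_mod_right]
      rw [h3, Nat.mod_eq_of_lt h2]
    simp only [List.length_map, he, List.getElem_map, PySem.List.slice_to_natCast]
    exact pv_row_eq _ C b' hC (by simpa [he] using hrlen) hbC

-- A's running 'best' loop over the translations is exactly Python min() of the candidate list
theorem pv_fold_min (l : List (Int × Int)) (f : Int × Int → List Char) :
    l.foldl (fun best p => match best with
      | none => some (f p)
      | some b => if f p < b then some (f p) else some b) none
      = PySem.List.min? (l.map f) (fun s => s) := by
  unfold PySem.List.min?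
  rw [List.foldl_map]
  congr 1
  funext acc p
  cases acc <;> rfl

-- ===== VERDICT (by name: the statement is the Claim_ definition above) =====
theorem canonicalize_torus_spec : Claim_equal_canonicalize_torus := by
  intro grid _hdom hpre
  obtain ⟨_hne, hC, hrows⟩ := hpre
  unfold Spec_canonicalize_torus canonicalize_torus canonicalize_torus_alt
  dsimp only
  simp only [pv_headD_eq]
  congr 1
  rw [pv_fold_min]
  congr 2
  unfold torus_translations
  rw [List.map_flatMap, List.flatMap_def, List.flatMap_def]
  congr 1
  apply List.map_congr_left
  intro dr hdr
  obtain ⟨hdr0, hdrR⟩ := (PySem.List.mem_pyRange_one).1 hdr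
  rw [List.map_map]
  apply List.map_congr_left
  intro dc hdc
  obtain ⟨hdc0, hdcC⟩ := (PySem.List.mem_pyRange_one).1 hdc
  simp only [Function.comp_apply]
  exact pv_cand_eq grid hC hrows dr dc hdr0 hdrR hdc0 hdcC
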